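-- pv_equiv track=rewrite | github.com/hogangnono/hogangnono-test | projects/asm-cli/bin/asm_runtime.py | token_match_strength
-- ===== SOURCE A (Python) =====
-- def token_match_strength(query_token: str, field_tokens: list[str]) -> int:
--     best = 0
--     for token in field_tokens:
--         if token == query_token:
--             return 3
--         if token.startswith(query_token):
--             best = max(best, 2)
--             continue
--         if query_token in token:
--             best = max(best, 1)
--     return best
-- ===== SOURCE B (Python) =====
-- def token_match_strength(query_token: str, field_tokens: list[str]) -> int:
--     if query_token in field_tokens:
--         return 3
--     if any(t.startswith(query_token) for t in field_tokens):
--         return 2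
--     if any(query_token in t for t in field_tokens):
--         return 1
--     return 0
-- ===== Notes on version B (the rewrite author's own statement) =====
-- stated objective: idiomatic
-- what changed: Replaces the single accumulating loop with early exit by three tiered short-circuit scans (membership, any-startswith, any-substring) in decreasing priority, eliminating the best accumulator.
import Mathlib
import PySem

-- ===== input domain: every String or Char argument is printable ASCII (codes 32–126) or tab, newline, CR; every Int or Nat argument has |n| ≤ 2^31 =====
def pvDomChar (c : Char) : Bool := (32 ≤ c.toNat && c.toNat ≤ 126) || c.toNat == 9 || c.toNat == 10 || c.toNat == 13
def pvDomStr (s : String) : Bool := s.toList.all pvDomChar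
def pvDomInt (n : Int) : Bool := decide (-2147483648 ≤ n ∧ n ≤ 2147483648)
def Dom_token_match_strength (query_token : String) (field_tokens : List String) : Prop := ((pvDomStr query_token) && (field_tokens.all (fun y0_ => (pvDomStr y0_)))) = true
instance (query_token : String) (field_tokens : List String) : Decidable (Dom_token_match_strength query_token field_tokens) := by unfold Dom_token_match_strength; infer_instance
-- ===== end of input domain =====

-- B replaces A's accumulator loop by three tiered short-circuit scans of the list (idiomatic; same cost).

-- ===== PORT A =====
-- A's loop: early return 3 on equality, otherwise accumulate best ∈ {0,1,2}.
def tmsLoop (query_token : String) : List String → Int → Int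
  | [], best => best
  | token :: rest, best =>
    if token = query_token then 3
    else if PySem.Str.startswith token query_token then tmsLoop query_token rest (max best 2)
    else if PySem.Str.isIn query_token token then tmsLoop query_token rest (max best 1)
    else tmsLoop query_token rest best

def token_match_strength (query_token : String) (field_tokens : List String) : Int :=
  tmsLoop query_token field_tokens 0

-- ===== PORT B =====
def token_match_strength_alt (query_token : String) (field_tokens : List String) : Int :=
  if field_tokens.any (fun t => t = query_token) then 3
  else if field_tokens.any (fun t => PySem.Str.startswith t query_token) then 2
  else if field_tokens.any (fun t => PySem.Str.isIn query_token t) then 1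
  else 0

-- ===== PRECONDITION & SPEC =====
def Spec_token_match_strength (query_token : String) (field_tokens : List String) (out : Int) : Prop := out = token_match_strength_alt query_token field_tokens
instance (query_token : String) (field_tokens : List String) (out : Int) : Decidable (Spec_token_match_strength query_token field_tokens out) := by unfold Spec_token_match_strength; infer_instance

-- ===== CLAIM (what is proved, stated in full; the proofs are below) =====
def Claim_equal_token_match_strength : Prop := ∀ (query_token : String) (field_tokens : List String), Dom_token_match_strength query_token field_tokens → Spec_token_match_strength query_token field_tokens (token_match_strength query_token field_tokens)

-- ===== LEMMAS AND PROOFS =====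

-- Characterisation of A's loop: equality short-circuits to 3, otherwise the result is
-- the max of the accumulator and the tiered score of the remaining tokens.
theorem tmsLoop_eq (q : String) (ts : List String) (best : Int) (hb : 0 ≤ best) :
    tmsLoop q ts best =
      if ts.any (fun t => t = q) then 3
      else max best (if ts.any (fun t => PySem.Str.startswith t q) then 2
        else if ts.any (fun t => PySem.Str.isIn q t) then 1 else 0) := by
  induction ts generalizing best with
  | nil => simp [tmsLoop]; omega
  | cons t rest ih =>
    by_cases h1 : t = q
    · simp [tmsLoop, h1]
    · by_cases h2 : PySem.Str.startswith t q
      · rw [tmsLoop, if_neg h1, if_pos h2, ih _ (by omega)]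
        simp only [List.any_cons, h1, h2, decide_false, Bool.false_or, Bool.true_or, if_true]
        cases hE : rest.any (fun t => decide (t = q)) <;> simp
        all_goals split_ifs <;> omega
      · by_cases h3 : PySem.Str.isIn q t
        · rw [tmsLoop, if_neg h1, if_neg h2, if_pos h3, ih _ (by omega)]
          simp only [List.any_cons, h1, h2, h3, decide_false, Bool.false_or]
          cases hE : rest.any (fun t => decide (t = q)) <;> simp
          all_goals split_ifs <;> omega
        · rw [tmsLoop, if_neg h1, if_neg h2, if_neg h3]
          simp only [List.any_cons, h1, h2, h3, decide_false, Bool.false_or]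
          exact ih best hb

-- ===== VERDICT (by name: the statement is the Claim_ definition above) =====
theorem token_match_strength_spec : Claim_equal_token_match_strength := by
  intro q ts _
  unfold Spec_token_match_strength token_match_strength token_match_strength_alt
  rw [tmsLoop_eq q ts 0 le_rfl]
  split_ifs <;> omega
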